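-- pv_equiv track=rewrite | github.com/a-brandon/practice | edabit/shuffled_properly.py | is_shuffled_well
-- ===== SOURCE A (Python) =====
-- def is_shuffled_well(nums):
--     curr_num, count = nums[0], 1
--
--     for n in nums[1:]:
--         if n + 1 == curr_num or n - 1 == curr_num:
--             count += 1
--         else:
--             count = 1
--
--         if count == 3:
--             return False
--
--         curr_num = n
--
--     return True
-- ===== SOURCE B (Python) =====
-- def is_shuffled_well(nums):
--     adj = [abs(b - a) == 1 for a, b in zip(nums, nums[1:])]
--     return not any(x and y for x, y in zip(adj, adj[1:]))
-- ===== Notes on version B (the rewrite author's own statement) =====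
-- stated objective: simpler
-- what changed: Replaces A's running-counter state machine with early return by building the adjacency table of consecutive pairs once and then checking that no two consecutive table entries are both true.
import Mathlib
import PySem

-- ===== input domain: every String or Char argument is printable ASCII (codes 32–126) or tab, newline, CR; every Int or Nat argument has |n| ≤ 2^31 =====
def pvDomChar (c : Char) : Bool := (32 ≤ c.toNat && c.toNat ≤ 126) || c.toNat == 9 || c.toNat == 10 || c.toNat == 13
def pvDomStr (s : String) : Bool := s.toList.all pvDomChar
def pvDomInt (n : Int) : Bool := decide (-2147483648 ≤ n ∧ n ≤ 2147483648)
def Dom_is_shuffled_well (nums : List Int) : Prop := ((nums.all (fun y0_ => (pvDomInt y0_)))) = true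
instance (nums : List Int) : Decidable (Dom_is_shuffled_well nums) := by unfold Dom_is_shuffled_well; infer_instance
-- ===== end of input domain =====

-- B replaces A's running-counter state machine with an adjacency table of consecutive
-- pairs scanned for two consecutive true entries (objective: simpler).


-- ===== PORT A =====
-- A's for-loop over nums[1:] carrying (curr_num, count), with the early `return False`.
def pvLoopA (curr : Int) (count : Int) : List Int → Bool
  | [] => true
  | n :: rest =>
      let count' : Int := if n + 1 == curr || n - 1 == curr then count + 1 else 1
      if count' == 3 then false else pvLoopA n count' rest

def is_shuffled_well (nums : List Int) : Bool :=
  match nums with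
  | [] => true   -- A raises IndexError here (nums[0]); excluded by Pre_
  | c :: rest => pvLoopA c 1 rest

-- ===== PORT B =====
def is_shuffled_well_alt (nums : List Int) : Bool :=
  let adj := (nums.zip nums.tail).map (fun p => (p.2 - p.1).natAbs == 1)
  !((adj.zip adj.tail).any (fun p => p.1 && p.2))

-- ===== PRECONDITION & SPEC =====
-- Pre_ excludes exactly the empty list, on which A raises IndexError at nums[0].
def Pre_is_shuffled_well (nums : List Int) : Prop := nums ≠ []
instance (nums : List Int) : Decidable (Pre_is_shuffled_well nums) := by unfold Pre_is_shuffled_well; infer_instance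
def pvWitness_is_shuffled_well : List Int := [1, 5, 3]

def Spec_is_shuffled_well (nums : List Int) (out : Bool) : Prop := out = is_shuffled_well_alt nums
instance (nums : List Int) (out : Bool) : Decidable (Spec_is_shuffled_well nums out) := by unfold Spec_is_shuffled_well; infer_instance

-- ===== CLAIM (what is proved, stated in full; the proofs are below) =====
def Claim_equal_is_shuffled_well : Prop := ∀ (nums : List Int), Dom_is_shuffled_well nums → Pre_is_shuffled_well nums → Spec_is_shuffled_well nums (is_shuffled_well nums)
-- ===== LEMMAS AND PROOFS =====

-- Common recursive characterisation: no three chained (|diff| = 1) consecutive elements.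
def pvG : List Int → Bool
  | a :: b :: c :: t => (!(((b - a).natAbs == 1) && ((c - b).natAbs == 1))) && pvG (b :: c :: t)
  | _ => true

lemma adj_eq (curr n : Int) :
    ((n + 1 == curr) || (n - 1 == curr)) = ((n - curr).natAbs == 1) := by
  rw [Bool.eq_iff_iff]
  simp only [Bool.or_eq_true, beq_iff_eq]
  omega

lemma loopA_eq : ∀ (rest : List Int) (curr : Int),
    (pvLoopA curr 1 rest = pvG (curr :: rest)) ∧
    (∀ (m : Int) (u : List Int), rest = m :: u →
      pvLoopA curr 2 rest = if (m - curr).natAbs = 1 then false else pvG (curr :: rest)) := by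
  intro rest
  induction rest with
  | nil => intro curr; exact ⟨rfl, fun m u h => nomatch h⟩
  | cons n t ih =>
      intro curr
      by_cases hadj : (n - curr).natAbs = 1
      · have hb : ((n + 1 == curr) || (n - 1 == curr)) = true := by
          rw [adj_eq]; simp [hadj]
        constructor
        · simp only [pvLoopA, hb]
          norm_num
          cases t with
          | nil => simp [pvLoopA, pvG]
          | cons m u =>
              rw [(ih n).2 m u rfl]
              by_cases h3 : (m - n).natAbs = 1 <;> simp [pvG, hadj, h3]
        · intro m u hmu
          injection hmu with h1 h2
          subst h1; subst h2
          rw [if_pos hadj]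
          simp [pvLoopA, hb]
      · have hb : ((n + 1 == curr) || (n - 1 == curr)) = false := by
          rw [adj_eq]; simp [hadj]
        have hstep : ∀ (cnt : Int), pvLoopA curr cnt (n :: t) = pvLoopA n 1 t := by
          intro cnt
          simp [pvLoopA, hb]
        have hG : pvG (curr :: n :: t) = pvG (n :: t) := by
          cases t with
          | nil => simp [pvG]
          | cons m u => simp [pvG, hadj]
        constructor
        · rw [hstep 1, hG, (ih n).1]
        · intro m u hmu
          injection hmu with h1 h2
          subst h1; subst h2
          rw [if_neg hadj, hstep 2, hG, (ih n).1]

lemma alt_eq_pvG : ∀ (nums : List Int), is_shuffled_well_alt nums = pvG nums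
  | [] => rfl
  | [_] => rfl
  | [_, _] => by simp [is_shuffled_well_alt, pvG]
  | a :: b :: c :: t => by
      have ih := alt_eq_pvG (b :: c :: t)
      simp only [is_shuffled_well_alt, List.tail_cons, List.zip_cons_cons, List.map_cons,
        List.any_cons, Bool.not_or] at ih ⊢
      rw [pvG, ← ih]
  termination_by nums => nums.length

-- ===== VERDICT (by name: the statement is the Claim_ definition above) =====
theorem is_shuffled_well_spec : Claim_equal_is_shuffled_well := by
  intro nums _ hpre
  unfold Spec_is_shuffled_well
  cases nums with
  | nil => exact absurd rfl hpre
  | cons c rest =>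
      rw [alt_eq_pvG]
      simp only [is_shuffled_well]
      exact (loopA_eq rest c).1
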